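-- pv_equiv track=rewrite | github.com/AnnaGrBio/DESWOMAN | deswoman_src/module_global_alignment_properties.py | searchATG
-- ===== SOURCE A (Python) =====
-- def look_ATG_frameshift(denovo : str, nchit : str) -> (str, int):
--     """
--     This function checks if an ATG start codon is present within the first 20 nucleotides of a given aligned homolog sequence.
--
--     The function scans the first 20 nucleotides (or the length of the sequence, whichever is shorter) of the alignment to see if
--     any 3 consecutive nucleotides form the start codon 'ATG'. If an 'ATG' is found, the function updates the status to 'S'
--     (indicating the presence of an ATG) and returns the position of the first occurrence of the 'ATG' codon.
--
--     If no 'ATG' is found within the first 20 nucleotides, the function returns the default status 'A' (absence of ATG) and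
--     the position is set to -20, indicating that no valid start codon was detected.
--
--     Parameters:
--     -----------
--     denovo : str
--         An identifier or name for the denovo gene or sequence being analyzed (not used in the logic but may be for tracking).
--
--     nchit : str
--         The aligned nucleotide sequence (as a string), where '-' represents gaps in the alignment and other characters represent
--         the actual nucleotides.
--
--     Returns:
--     --------
--     tuple
--         A tuple with two elements:
--         - presence_atg (str): 'S' if an ATG start codon is found within the first 20 nucleotides, 'A' if not.
--         - pos_ATG_in_ali (int): The position of the first 'ATG' codon in the sequence (0-based index), or -20 if no ATG is found.
--     """
--     presence_atg = "A"
--     compteur_nucl = -1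
--     pos_ATG_in_ali = -20
--     for compteur_pos in range(0,len(nchit)):
--         if nchit[compteur_pos] != "-":
--             compteur_nucl += 1
--             nucl = ""
--             nucl += nchit[compteur_pos].upper()
--             # Look for Start
--             if nucl == "A":
--                 for compteur_pos_next in range(compteur_pos + 1,len(nchit)):
--                     if nchit[compteur_pos_next] != "-":
--                         nucl += nchit[compteur_pos_next].upper()
--                     if len(nucl) == 3:
--                         if nucl == "ATG":
--                             pos_ATG_in_ali = compteur_pos
--                             presence_atg = "S"
--                         break
--             if presence_atg == "S" or compteur_nucl > 20:
--                 break
--     return presence_atg, pos_ATG_in_ali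
--
-- def searchATG(alignment : list) -> (str, int):
--     """
--     Search for the presence of the ATG start codon in an alignment of sequences.
--
--     This function examines an alignment of two sequences: a "denovo" gene sequence and a corresponding homologous sequence ("nchit").
--     It looks for the presence of the ATG start codon within the homologous sequence (nchit), accounting for gaps in the alignment.
--     If the first non-gap nucleotides in the homologous sequence form an ATG, the function returns "P" (for presence).
--     If the start codon is shifted due to a frameshift, the function will call the `look_ATG_frameshift` function to investigate further.
--     If no ATG is found, the function returns "A" (for absence).
--
--     Parameters:
--     -----------
--     alignment : tuple
--         A tuple containing two elements:
--         - denovo (str): A string representing the denovo gene sequence (used to compare the start codon position).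
--         - nchit (str): A string representing the homologous sequence (may contain gaps represented by '-').
--
--     Returns:
--     --------
--     tuple
--         A tuple containing:
--         - presence_ATG (str): "P" if ATG is found at the beginning of the homologous sequence, "A" if not, or "S" if frameshifted ATG is found.
--         - start_atg_in_ali (int): The position of the start ATG codon in the homologous sequence, or -20 if no valid ATG is found.
--     """
--     presence_ATG = "A"
--     start_atg_in_ali = -20
--
--     denovo = alignment[0]
--     nchit = alignment[1]
--     for numbers_1 in range(0,len(denovo)):
--         if denovo[numbers_1] != "-":
--             break
--     start_nchit = ""
--     for numbers_2 in range(numbers_1,len(nchit)):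
--         if nchit[numbers_2] != "-":
--             start_nchit += nchit[numbers_2].upper()
--             if len(start_nchit) == 3:
--                 break
--     if start_nchit != "ATG":
--         presence_ATG, start_atg_in_ali = look_ATG_frameshift(denovo, nchit)
--     else:
--         presence_ATG = "P"
--
--     return presence_ATG, start_atg_in_ali
-- ===== SOURCE B (Python) =====
-- def searchATG(alignment):
--     denovo = alignment[0]
--     nchit = alignment[1]
--     j = next((i for i, c in enumerate(denovo) if c != '-'), len(denovo) - 1)
--     head = ''.join(c.upper() for c in nchit[j:] if c != '-')[:3]
--     if head == 'ATG':
--         return 'P', -20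
--     ungapped = [(i, c.upper()) for i, c in enumerate(nchit) if c != '-']
--     chars = ''.join(c for _, c in ungapped)
--     for k in range(min(22, len(ungapped))):
--         if chars[k:k+3] == 'ATG':
--             return 'S', ungapped[k][0]
--     return 'A', -20
-- ===== Notes on version B (the rewrite author's own statement) =====
-- stated objective: simpler
-- what changed: B inlines the look_ATG_frameshift helper and replaces A's nested per-character loops (inner loop rebuilding each codon) with one precomputed gap-free (position, uppercase char) list, so the start-codon test and the 22-nucleotide frameshift scan become simple slice comparisons over that list.
import Mathlib
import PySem

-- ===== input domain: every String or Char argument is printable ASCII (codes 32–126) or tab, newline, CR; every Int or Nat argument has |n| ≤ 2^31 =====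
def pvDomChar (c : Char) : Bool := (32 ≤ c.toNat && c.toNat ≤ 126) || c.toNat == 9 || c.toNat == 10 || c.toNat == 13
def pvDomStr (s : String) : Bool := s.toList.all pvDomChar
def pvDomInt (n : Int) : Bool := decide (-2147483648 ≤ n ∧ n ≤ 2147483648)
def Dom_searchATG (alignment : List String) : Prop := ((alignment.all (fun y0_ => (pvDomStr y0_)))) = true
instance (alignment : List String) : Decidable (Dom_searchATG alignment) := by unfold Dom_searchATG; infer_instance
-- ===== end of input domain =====

-- B inlines the helper and scans a precomputed gap-free index/char list instead of A's nested character loops (objective: simpler).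

-- ===== PORT A =====
-- for numbers_1 in range(0,len(denovo)): break at first non-gap; falls through leaving numbers_1 = len-1
def pvA_firstIdx : List Char → Nat → Nat
  | [], i => i - 1
  | c :: rest, i => if c ≠ '-' then i else pvA_firstIdx rest (i + 1)

-- for numbers_2 in range(numbers_1,len(nchit)): build start_nchit (≤ 3 uppercased non-gap chars)
def pvA_start : List Char → List Char → List Char
  | [], acc => acc
  | c :: rest, acc =>
    if c ≠ '-' then
      let acc' := acc ++ [c.toUpper]
      if acc'.length = 3 then acc' else pvA_start rest acc'
    else pvA_start rest acc

-- inner loop of look_ATG_frameshift: for compteur_pos_next in range(compteur_pos+1,len(nchit))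
def pvA_inner : List Char → List Char → List Char
  | [], nucl => nucl
  | c :: rest, nucl =>
    let nucl' := if c ≠ '-' then nucl ++ [c.toUpper] else nucl
    if nucl'.length = 3 then nucl' else pvA_inner rest nucl'

-- outer loop of look_ATG_frameshift, carrying compteur_pos and compteur_nucl
def pvA_outer : List Char → Int → Int → String × Int
  | [], _, _ => ("A", -20)
  | c :: rest, pos, cnt =>
    if c ≠ '-' then
      let cnt' := cnt + 1
      if c.toUpper = 'A' then
        let nucl := pvA_inner rest [c.toUpper]
        if nucl = ['A', 'T', 'G'] then ("S", pos)
        else if cnt' > 20 then ("A", -20) else pvA_outer rest (pos + 1) cnt'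
      else if cnt' > 20 then ("A", -20) else pvA_outer rest (pos + 1) cnt'
    else pvA_outer rest (pos + 1) cnt

def searchATG (alignment : List String) : String × Int :=
  match alignment with
  | denovo :: nchit :: _ =>
    let d := denovo.toList
    let n := nchit.toList
    let numbers1 := pvA_firstIdx d 0
    let startNchit := pvA_start (n.drop numbers1) []
    if startNchit ≠ ['A', 'T', 'G'] then pvA_outer n 0 (-1)
    else ("P", -20)
  | _ => ("A", -20)   -- alignment[0]/alignment[1] raises IndexError: outside Pre_

-- ===== PORT B =====
-- for k in range(min(22, len(ungapped))): return at first ATG triple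
def pvB_scan (u : List (Int × Char)) (cs : List Char) (k : Nat) : Nat → String × Int
  | 0 => ("A", -20)   -- fuel; never reached before the k-guard when started with fuel 22
  | fuel + 1 =>
    if k < min 22 u.length then
      if (cs.drop k).take 3 = ['A', 'T', 'G'] then ("S", (u.getD k (0, ' ')).1)
      else pvB_scan u cs (k + 1) fuel
    else ("A", -20)

def searchATG_alt (alignment : List String) : String × Int :=
  match alignment with
  | [] => ("A", -20)   -- alignment[0] raises IndexError: outside Pre_
  | [_] => ("A", -20)  -- alignment[1] raises IndexError: outside Pre_
  | denovo :: nchit :: _ =>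
    let d := denovo.toList
    let n := nchit.toList
    let j : Int := match (PySem.List.enumerate d).find? (fun ic => ic.2 ≠ '-') with
      | some ic => ic.1
      | none => (d.length : Int) - 1
    let head := (((PySem.List.slice n (some j) none).filter (fun c => c ≠ '-')).map Char.toUpper).take 3
    if head = ['A', 'T', 'G'] then ("P", -20)
    else
      let ungapped := (PySem.List.enumerate n).filterMap
        (fun ic => if ic.2 ≠ '-' then some (ic.1, ic.2.toUpper) else none)
      let chars := ungapped.map Prod.snd
      pvB_scan ungapped chars 0 22

-- ===== PRECONDITION & SPEC =====
-- A raises IndexError when the list has fewer than 2 entries and NameError when alignment[0] is the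
-- empty string (numbers_1 never gets bound); Pre_ excludes exactly those inputs.
def Pre_searchATG (alignment : List String) : Prop :=
  2 ≤ alignment.length ∧ alignment.getD 0 "" ≠ ""
instance (alignment : List String) : Decidable (Pre_searchATG alignment) := by
  unfold Pre_searchATG; infer_instance

def pvWitness_searchATG : List String := ["AT-", "AT-G"]

def Spec_searchATG (alignment : List String) (out : String × Int) : Prop := out = searchATG_alt alignment
instance (alignment : List String) (out : String × Int) : Decidable (Spec_searchATG alignment out) := by unfold Spec_searchATG; infer_instance

-- ===== CLAIM (what is proved, stated in full; the proofs are below) =====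
def Claim_equal_searchATG : Prop := ∀ (alignment : List String), Dom_searchATG alignment → Pre_searchATG alignment → Spec_searchATG alignment (searchATG alignment)

-- ===== LEMMAS AND PROOFS =====

-- ungapped with absolute positions, structurally (proof-side reference)
def pvUg : List Char → Int → List (Int × Char)
  | [], _ => []
  | c :: rest, p => if c ≠ '-' then (p, c.toUpper) :: pvUg rest (p + 1) else pvUg rest (p + 1)

-- reference scanner: check up to `budget` leading ungapped triples
def pvSpec : List (Int × Char) → Nat → String × Int
  | _, 0 => ("A", -20)
  | [], _ => ("A", -20)
  | (p, c) :: rest, b + 1 =>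
    if c :: (rest.map Prod.snd).take 2 = ['A', 'T', 'G'] then ("S", p)
    else pvSpec rest b

lemma pvUg_eq_filterMap (m : List Char) (p : Int) :
    (PySem.List.enumerate m p).filterMap
      (fun ic => if ic.2 ≠ '-' then some (ic.1, ic.2.toUpper) else none) = pvUg m p := by
  induction m generalizing p with
  | nil => simp [PySem.List.enumerate_nil, pvUg]
  | cons c rest ih =>
    rw [PySem.List.enumerate_cons, List.filterMap_cons]
    by_cases hc : c = '-' <;> simpa [pvUg, hc] using ih (p + 1)

lemma pvUg_map_snd (m : List Char) (p : Int) :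
    (pvUg m p).map Prod.snd = (m.filter (fun c => c ≠ '-')).map Char.toUpper := by
  induction m generalizing p with
  | nil => simp [pvUg]
  | cons c rest ih =>
    by_cases hc : c = '-' <;> simp [pvUg, hc, ih]

lemma pvA_firstIdx_eq (l : List Char) (i : Nat) (hl : l ≠ []) :
    ((pvA_firstIdx l i : Nat) : Int) =
      (match (PySem.List.enumerate l (i : Int)).find? (fun ic => ic.2 ≠ '-') with
        | some ic => ic.1
        | none => (i : Int) + l.length - 1) := by
  induction l generalizing i with
  | nil => exact absurd rfl hl
  | cons c rest ih =>
    by_cases hc : c = '-'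
    · have hstep : pvA_firstIdx (c :: rest) i = pvA_firstIdx rest (i + 1) := by
        simp [pvA_firstIdx, hc]
      have hfind : (PySem.List.enumerate (c :: rest) (i : Int)).find? (fun ic => ic.2 ≠ '-') =
          (PySem.List.enumerate rest ((i : Int) + 1)).find? (fun ic => ic.2 ≠ '-') := by
        rw [PySem.List.enumerate_cons, List.find?_cons]
        simp [hc]
      rw [hstep, hfind]
      rcases rest with _ | ⟨c2, rest2⟩
      · have h0 : pvA_firstIdx ([] : List Char) (i + 1) = i := by
          show i + 1 - 1 = i
          omega
        simp only [h0, PySem.List.enumerate_nil, List.find?_nil, List.length_cons, List.length_nil]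
        push_cast
        ring
      · rw [ih (i + 1) (by simp)]
        have hcast : (((i + 1 : Nat) : Int)) = (i : Int) + 1 := by push_cast; ring
        rw [hcast]
        rcases hf : (PySem.List.enumerate (c2 :: rest2) ((i : Int) + 1)).find?
            (fun ic => ic.2 ≠ '-') with _ | ic
        · simp only [hf, List.length_cons]
          push_cast
          ring
        · simp only [hf]
    · simp [pvA_firstIdx, hc]

lemma pvA_start_eq (m acc : List Char) (h : acc.length < 3) :
    pvA_start m acc = (acc ++ (m.filter (fun c => c ≠ '-')).map Char.toUpper).take 3 := by
  induction m generalizing acc with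
  | nil => simp [pvA_start, List.take_of_length_le (by omega : acc.length ≤ 3)]
  | cons c rest ih =>
    by_cases hc : c = '-'
    · simp [pvA_start, hc, ih acc h]
    · simp only [pvA_start, hc, ne_eq, not_false_iff, if_pos]
      by_cases h3 : (acc ++ [c.toUpper]).length = 3
      · simp only [h3, if_pos]
        rw [List.filter_cons_of_pos (by simp [hc]), List.map_cons,
          show acc ++ c.toUpper :: (List.map Char.toUpper (rest.filter (fun c => c ≠ '-'))) =
            (acc ++ [c.toUpper]) ++ List.map Char.toUpper (rest.filter (fun c => c ≠ '-')) by simp]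
        rw [List.take_append_of_le_length (by omega), List.take_of_length_le (by omega)]
      · simp only [h3, ite_false]
        rw [ih (acc ++ [c.toUpper]) (by simp at h3 ⊢; omega)]
        simp [hc]

lemma pvA_inner_eq (m acc : List Char) (h : acc.length < 3) :
    pvA_inner m acc = (acc ++ (m.filter (fun c => c ≠ '-')).map Char.toUpper).take 3 := by
  induction m generalizing acc with
  | nil => simp [pvA_inner, List.take_of_length_le (by omega : acc.length ≤ 3)]
  | cons c rest ih =>
    by_cases hc : c = '-'
    · simp only [pvA_inner, hc, ne_eq, not_true_eq_false, if_false]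
      rw [if_neg (by omega)]
      simp [ih acc h]
    · simp only [pvA_inner, hc, ne_eq, not_false_iff, if_pos]
      by_cases h3 : (acc ++ [c.toUpper]).length = 3
      · simp only [h3, if_pos]
        rw [List.filter_cons_of_pos (by simp [hc]), List.map_cons,
          show acc ++ c.toUpper :: (List.map Char.toUpper (rest.filter (fun c => c ≠ '-'))) =
            (acc ++ [c.toUpper]) ++ List.map Char.toUpper (rest.filter (fun c => c ≠ '-')) by simp]
        rw [List.take_append_of_le_length (by omega), List.take_of_length_le (by omega)]
      · simp only [h3, ite_false]
        rw [ih (acc ++ [c.toUpper]) (by simp at h3 ⊢; omega)]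
        simp [hc]

lemma pvA_outer_eq (m : List Char) (pos cnt : Int) (h1 : -1 ≤ cnt) (h2 : cnt ≤ 20) :
    pvA_outer m pos cnt = pvSpec (pvUg m pos) (21 - cnt).toNat := by
  induction m generalizing pos cnt with
  | nil => cases h : (21 - cnt).toNat <;> simp [pvA_outer, pvUg, pvSpec]
  | cons c rest ih =>
    by_cases hc : c = '-'
    · rw [show pvA_outer (c :: rest) pos cnt = pvA_outer rest (pos + 1) cnt by
        simp [pvA_outer, hc]]
      rw [show pvUg (c :: rest) pos = pvUg rest (pos + 1) by simp [pvUg, hc]]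
      exact ih (pos + 1) cnt h1 h2
    · have hb : (21 - cnt).toNat = (20 - cnt).toNat + 1 := by omega
      rw [show pvUg (c :: rest) pos = (pos, c.toUpper) :: pvUg rest (pos + 1) by
        simp [pvUg, hc]]
      rw [hb]
      rw [show pvSpec ((pos, c.toUpper) :: pvUg rest (pos + 1)) ((20 - cnt).toNat + 1) =
          (if c.toUpper :: ((pvUg rest (pos + 1)).map Prod.snd).take 2 = ['A', 'T', 'G']
           then ("S", pos) else pvSpec (pvUg rest (pos + 1)) (20 - cnt).toNat) from rfl]
      rw [pvUg_map_snd]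
      have hinner : pvA_inner rest [c.toUpper] =
          c.toUpper :: ((rest.filter (fun c => c ≠ '-')).map Char.toUpper).take 2 := by
        rw [pvA_inner_eq rest [c.toUpper] (by simp)]
        simp
      by_cases hA : c.toUpper = 'A'
      · rw [show pvA_outer (c :: rest) pos cnt =
            (if pvA_inner rest [c.toUpper] = ['A', 'T', 'G'] then ("S", pos)
             else if cnt + 1 > 20 then ("A", -20) else pvA_outer rest (pos + 1) (cnt + 1)) by
          simp [pvA_outer, hc, hA]]
        rw [hinner]
        by_cases htrip :
            c.toUpper :: ((rest.filter (fun c => c ≠ '-')).map Char.toUpper).take 2 = ['A', 'T', 'G']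
        · rw [if_pos htrip, if_pos htrip]
        · rw [if_neg htrip, if_neg htrip]
          by_cases hcnt : cnt + 1 > 20
          · have hb0 : (20 - cnt).toNat = 0 := by omega
            rw [if_pos hcnt, hb0]
            rcases hu : pvUg rest (pos + 1) with _ | _ <;> simp [pvSpec]
          · rw [if_neg hcnt, ih (pos + 1) (cnt + 1) (by omega) (by omega)]
            congr 1
            omega
      · have htrip :
            ¬ c.toUpper :: ((rest.filter (fun c => c ≠ '-')).map Char.toUpper).take 2 = ['A', 'T', 'G'] := by
          intro h
          exact hA (by injection h)
        rw [show pvA_outer (c :: rest) pos cnt =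
            (if cnt + 1 > 20 then ("A", -20) else pvA_outer rest (pos + 1) (cnt + 1)) by
          simp [pvA_outer, hc, hA]]
        rw [if_neg htrip]
        by_cases hcnt : cnt + 1 > 20
        · have hb0 : (20 - cnt).toNat = 0 := by omega
          rw [if_pos hcnt, hb0]
          rcases hu : pvUg rest (pos + 1) with _ | _ <;> simp [pvSpec]
        · rw [if_neg hcnt, ih (pos + 1) (cnt + 1) (by omega) (by omega)]
          congr 1
          omega

lemma pvB_scan_eq (u : List (Int × Char)) (m k : Nat) (hk : k + m = 22) :
    pvB_scan u (u.map Prod.snd) k m = pvSpec (u.drop k) m := by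
  induction m generalizing k with
  | zero =>
    have : ¬ k < min 22 u.length := by omega
    simp [pvB_scan, pvSpec]
  | succ m ih =>
    by_cases hk : k < u.length
    · have hmin : k < min 22 u.length := by omega
      rw [show pvB_scan u (u.map Prod.snd) k (m + 1) =
          (if ((u.map Prod.snd).drop k).take 3 = ['A', 'T', 'G'] then ("S", (u.getD k (0, ' ')).1)
           else pvB_scan u (u.map Prod.snd) (k + 1) m) by simp [pvB_scan, hmin]]
      have hdrop : u.drop k = u[k] :: u.drop (k + 1) := List.drop_eq_getElem_cons hk
      have hcs : ((u.map Prod.snd).drop k).take 3 =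
          u[k].2 :: ((u.drop (k + 1)).map Prod.snd).take 2 := by
        rw [← List.map_drop, hdrop, List.map_cons, List.take_succ_cons]
      have hgetD : u.getD k (0, ' ') = u[k] := List.getD_eq_getElem u _ hk
      rw [hcs, hgetD, hdrop]
      rcases hu : u[k] with ⟨p, c⟩
      simp only [pvSpec]
      split_ifs
      · rfl
      · exact ih (k + 1) (by omega)
    · have : ¬ k < min 22 u.length := by omega
      rw [List.drop_of_length_le (by omega)]
      simp [pvB_scan, pvSpec, this]

-- ===== VERDICT (by name: the statement is the Claim_ definition above) =====
theorem searchATG_spec : Claim_equal_searchATG := by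
  intro al _ hpre
  obtain ⟨hlen, hne⟩ := hpre
  unfold Spec_searchATG
  match al with
  | [] => simp at hlen
  | [_] => simp at hlen
  | d :: n :: rest =>
    simp only [List.getD_cons_zero] at hne
    have hd : d.toList ≠ [] := by
      intro h
      exact hne (String.ext (by simpa using h))
    simp only [searchATG, searchATG_alt]
    have hj : (match (PySem.List.enumerate d.toList).find? (fun ic => ic.2 ≠ '-') with
        | some ic => ic.1 | none => ((d.toList.length : Int) - 1)) =
        ((pvA_firstIdx d.toList 0 : Nat) : Int) := by
      rw [show PySem.List.enumerate d.toList = PySem.List.enumerate d.toList ((0 : Nat) : Int) by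
        norm_num]
      rw [pvA_firstIdx_eq d.toList 0 hd]
      simp only [Nat.cast_zero, zero_add]
    rw [hj, PySem.List.slice_from_natCast]
    have hstart : pvA_start (n.toList.drop (pvA_firstIdx d.toList 0)) [] =
        (((n.toList.drop (pvA_firstIdx d.toList 0)).filter (fun c => c ≠ '-')).map Char.toUpper).take 3 := by
      rw [pvA_start_eq _ [] (by simp)]
      simp
    rw [hstart]
    by_cases hATG :
        ((((n.toList.drop (pvA_firstIdx d.toList 0)).filter (fun c => c ≠ '-')).map Char.toUpper).take 3) = ['A', 'T', 'G']
    · rw [if_neg (by simpa using hATG), if_pos hATG]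
    · rw [if_pos hATG, if_neg hATG]
      rw [pvA_outer_eq n.toList 0 (-1) (by norm_num) (by norm_num)]
      rw [show ((21 : Int) - (-1)).toNat = 22 by decide]
      rw [pvUg_eq_filterMap n.toList 0]
      rw [pvB_scan_eq (pvUg n.toList 0) 22 0 rfl]
      rw [List.drop_zero]
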